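-- pv_equiv track=rewrite | github.com/dongsub-joung/Algorithms | 2. 프로그래머스/월간 챌린지/python Lvl1/13_모의고사.py | solutionTh
-- ===== SOURCE A (Python) =====
-- from itertools import cycle
--
-- def solutionTh(answers):
--     giveups =   [
--                 #cycle()은 반복 가능한 요소가 모두 소모될때까지 무한 반복하면서 사본을 리턴함.
--                 cycle([1,2,3,4,5]), #1,2,3,4,5,1,2,3,4,5...
--                 cycle([2,1,2,3,2,4,2,5]),
--                 cycle([3,3,1,1,2,2,4,4,5,5]),
--                 ]
--     scores =    [0, 0, 0]
--     for num in answers: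
--         for i in range(3):
--             #다음 리터럴 객체 반환
--             if next(giveups[i]) == num:
--                 scores[i] += 1
--
--     highest = max(scores)
--     return [i + 1 for i, v in enumerate(scores) if v == highest]
-- ===== SOURCE B (Python) =====
-- def solutionTh(answers):
--     # Histogram algorithm: 40 = lcm(5, 8, 10), so every pattern is a function of
--     # the index mod 40.  One pass buckets the answers by (index % 40, value);
--     # each score is then a fixed 40-entry table lookup, independent of answers.
--     patterns = [
--         [1, 2, 3, 4, 5],
--         [2, 1, 2, 3, 2, 4, 2, 5],
--         [3, 3, 1, 1, 2, 2, 4, 4, 5, 5],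
--     ]
--     hist = {}
--     for i, a in enumerate(answers):
--         k = (i % 40, a)
--         hist[k] = hist.get(k, 0) + 1
--     scores = [sum(hist.get((r, p[r % len(p)]), 0) for r in range(40))
--               for p in patterns]
--     highest = max(scores)
--     return [i + 1 for i, v in enumerate(scores) if v == highest]
-- ===== Notes on version B (the rewrite author's own statement) =====
-- stated objective: alternative
-- what changed: Replaces A's three lockstep cycle iterators matched against every answer by a histogram algorithm: one pass buckets answers into a dict keyed by (index mod 40, value) (40 = lcm of the pattern lengths), and each score is then a fixed 40-entry table lookup that never rescans the answers.
import Mathlib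
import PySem

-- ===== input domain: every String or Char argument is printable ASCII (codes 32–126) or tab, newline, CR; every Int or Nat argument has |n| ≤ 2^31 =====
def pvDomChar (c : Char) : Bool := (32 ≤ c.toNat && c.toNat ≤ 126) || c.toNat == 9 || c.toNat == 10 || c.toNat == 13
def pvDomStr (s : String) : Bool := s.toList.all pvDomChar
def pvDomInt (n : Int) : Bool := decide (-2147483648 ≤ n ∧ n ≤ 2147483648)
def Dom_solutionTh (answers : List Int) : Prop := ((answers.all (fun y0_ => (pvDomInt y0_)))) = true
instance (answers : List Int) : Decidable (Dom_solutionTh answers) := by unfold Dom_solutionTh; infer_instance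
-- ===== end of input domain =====

-- B replaces A's interleaved cycle-iterator matching by a histogram keyed by
-- (index mod 40, value); each score becomes a fixed 40-entry table sum (objective: alternative).

-- ===== PORT A =====
-- next(cycle(p)) after k previous calls returns p[k % len(p)]; the cycle's internal
-- position is modelled by the counter k carried in the fold state.
def cycNext (p : List Int) (k : Int) : Int :=
  PySem.List.pyGetD p (PySem.Int.mod k (p.length : Int)) 0

def solutionTh (answers : List Int) : List Int :=
  -- one pass over answers, advancing all three cycles in lockstep
  let st := answers.foldl
    (fun (s : Int × Int × Int × Int) num =>
      (s.1 + 1,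
       s.2.1   + (if cycNext [1,2,3,4,5] s.1 = num then 1 else 0),
       s.2.2.1 + (if cycNext [2,1,2,3,2,4,2,5] s.1 = num then 1 else 0),
       s.2.2.2 + (if cycNext [3,3,1,1,2,2,4,4,5,5] s.1 = num then 1 else 0)))
    (0, 0, 0, 0)
  let scores := [st.2.1, st.2.2.1, st.2.2.2]
  let highest := (PySem.List.max? scores (fun x => x)).getD 0   -- scores has 3 elements, max? is some
  (PySem.List.enumerate scores 0).foldl
    (fun acc (iv : Int × Int) => if iv.2 = highest then acc ++ [iv.1 + 1] else acc) []

-- ===== PORT B =====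
-- hist[k] = hist.get(k, 0) + 1 over enumerate(answers), k = (i % 40, a)
def histOf (answers : List Int) : PySem.Dict (Int × Int) Int :=
  (PySem.List.enumerate answers 0).foldl
    (fun d ia =>
      d.insert (PySem.Int.mod ia.1 40, ia.2) (d.getD (PySem.Int.mod ia.1 40, ia.2) 0 + 1))
    PySem.Dict.empty

-- sum(hist.get((r, p[r % len(p)]), 0) for r in range(40))
def patScoreH (hist : PySem.Dict (Int × Int) Int) (p : List Int) : Int :=
  (PySem.List.pyRange 0 40 1).foldl
    (fun s r => s + hist.getD (r, PySem.List.pyGetD p (PySem.Int.mod r (p.length : Int)) 0) 0) 0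

def solutionTh_alt (answers : List Int) : List Int :=
  let hist := histOf answers
  let scores :=
    [[1,2,3,4,5], [2,1,2,3,2,4,2,5], [3,3,1,1,2,2,4,4,5,5]].map (patScoreH hist)
  let highest := (PySem.List.max? scores (fun x => x)).getD 0
  (PySem.List.enumerate scores 0).foldl
    (fun acc (iv : Int × Int) => if iv.2 = highest then acc ++ [iv.1 + 1] else acc) []

-- ===== PRECONDITION & SPEC =====
def Spec_solutionTh (answers : List Int) (out : List Int) : Prop := out = solutionTh_alt answers
instance (answers : List Int) (out : List Int) : Decidable (Spec_solutionTh answers out) := by unfold Spec_solutionTh; infer_instance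

-- ===== CLAIM (what is proved, stated in full; the proofs are below) =====
def Claim_equal_solutionTh : Prop := ∀ (answers : List Int), Dom_solutionTh answers → Spec_solutionTh answers (solutionTh answers)

-- ===== LEMMAS AND PROOFS =====

-- proof-side: direct per-pattern match count with an arbitrary enumerate start
def cnt (p : List Int) (xs : List Int) (k : Int) : Int :=
  (PySem.List.enumerate xs k).foldl
    (fun s (ia : Int × Int) =>
      s + (if PySem.List.pyGetD p (PySem.Int.mod ia.1 (p.length : Int)) 0 = ia.2 then 1 else 0)) 0

theorem cnt_eq_sum (p : List Int) (xs : List Int) (k : Int) :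
    cnt p xs k
    = ((PySem.List.enumerate xs k).map
        (fun ia : Int × Int =>
          if PySem.List.pyGetD p (PySem.Int.mod ia.1 (p.length : Int)) 0 = ia.2 then (1 : Int) else 0)).sum := by
  rw [cnt, PySem.List.foldl_add]
  ring

theorem cnt_cons (p : List Int) (x : Int) (xs : List Int) (k : Int) :
    cnt p (x :: xs) k
    = (if PySem.List.pyGetD p (PySem.Int.mod k (p.length : Int)) 0 = x then (1 : Int) else 0)
      + cnt p xs (k + 1) := by
  rw [cnt_eq_sum, cnt_eq_sum, PySem.List.enumerate_cons, List.map_cons, List.sum_cons]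

-- A's interleaved fold computes exactly the three per-pattern counts.
theorem foldA_eq (xs : List Int) (k a b c : Int) :
    xs.foldl
      (fun (s : Int × Int × Int × Int) num =>
        (s.1 + 1,
         s.2.1   + (if cycNext [1,2,3,4,5] s.1 = num then 1 else 0),
         s.2.2.1 + (if cycNext [2,1,2,3,2,4,2,5] s.1 = num then 1 else 0),
         s.2.2.2 + (if cycNext [3,3,1,1,2,2,4,4,5,5] s.1 = num then 1 else 0)))
      (k, a, b, c)
    = (k + xs.length,
       a + cnt [1,2,3,4,5] xs k,
       b + cnt [2,1,2,3,2,4,2,5] xs k,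
       c + cnt [3,3,1,1,2,2,4,4,5,5] xs k) := by
  induction xs generalizing k a b c with
  | nil => simp [cnt, PySem.List.enumerate_nil]
  | cons x xs ih =>
    rw [List.foldl_cons, ih, cnt_cons, cnt_cons, cnt_cons]
    refine Prod.ext ?_ (Prod.ext ?_ (Prod.ext ?_ ?_)) <;>
      simp only [cycNext, List.length_cons] <;> push_cast <;> ring

-- the key list fed to the histogram
def keyOf (ia : Int × Int) : Int × Int := (PySem.Int.mod ia.1 40, ia.2)

theorem histOf_getD (xs : List Int) (v : Int × Int) :
    (histOf xs).getD v 0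
      = (((PySem.List.enumerate xs 0).map keyOf).count v : Int) := by
  have h : histOf xs
      = ((PySem.List.enumerate xs 0).map keyOf).foldl
          (fun d x => d.insert x (d.getD x 0 + 1)) PySem.Dict.empty := by
    rw [List.foldl_map]; rfl
  rw [h, PySem.Dict.getD_foldl_insert_add_one, PySem.Dict.getD_empty, zero_add]

-- one indicator survives the 40-entry sum: r hits c exactly once in range(40)
theorem sum_ind (v : Int → Int) (c x : Int) (h0 : 0 ≤ c) (h40 : c < 40) :
    ((PySem.List.pyRange 0 40 1).map
      (fun r => if (c, x) = (r, v r) then (1 : Int) else 0)).sum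
    = if v c = x then 1 else 0 := by
  have h1 : ((PySem.List.pyRange 0 40 1).map
      (fun r => if (c, x) = (r, v r) then (1 : Int) else 0)).sum
      = (((PySem.List.pyRange 0 40 1).countP (fun r => decide ((c, x) = (r, v r))) : Nat) : Int) := by
    rw [← PySem.List.sum_map_ite_one_zero]
    refine congrArg List.sum (List.map_congr_left ?_)
    intro r _
    simp
  rw [h1]
  by_cases hx : v c = x
  · rw [if_pos hx]
    have hc : (PySem.List.pyRange 0 40 1).countP (fun r => decide ((c, x) = (r, v r)))
        = (PySem.List.pyRange 0 40 1).countP (fun r => r == c) := by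
      apply List.countP_congr
      intro a _
      simp only [decide_eq_true_eq, Prod.mk.injEq, beq_iff_eq]
      constructor
      · rintro ⟨hca, -⟩; exact hca.symm
      · intro hac; subst hac; exact ⟨rfl, hx.symm⟩
    rw [hc, ← List.count_eq_countP,
      List.count_eq_one_of_mem (PySem.List.nodup_pyRange_one 0 40)
        ((PySem.List.mem_pyRange_one).mpr ⟨h0, h40⟩)]
    norm_num
  · rw [if_neg hx]
    have hz : (PySem.List.pyRange 0 40 1).countP
        (fun r => decide ((c, x) = (r, v r))) = 0 := by
      refine List.countP_eq_zero.mpr ?_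
      intro a _ h
      simp only [decide_eq_true_eq, Prod.mk.injEq] at h
      obtain ⟨hca, hxa⟩ := h
      subst hca
      exact hx hxa.symm
    rw [hz]
    norm_num

-- fold the emod tower: (k % 40) % len = k % len when len | 40
theorem mod_mod_40 (p : List Int) (h5 : 0 < p.length) (hdvd : (p.length : Int) ∣ 40) (k : Int) :
    PySem.Int.mod (PySem.Int.mod k 40) (p.length : Int) = PySem.Int.mod k (p.length : Int) := by
  rw [PySem.Int.mod_eq_emod_of_pos (by exact_mod_cast h5),
      PySem.Int.mod_eq_emod_of_pos (by norm_num),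
      PySem.Int.mod_eq_emod_of_pos (by exact_mod_cast h5),
      Int.emod_emod_of_dvd _ hdvd]

-- the histogram table read back over range(40) is the direct per-pattern count
theorem score_cnt (p : List Int) (h5 : 0 < p.length) (hdvd : (p.length : Int) ∣ 40)
    (xs : List Int) (k : Int) :
    ((PySem.List.pyRange 0 40 1).map
      (fun r => ((((PySem.List.enumerate xs k).map keyOf).count
          (r, PySem.List.pyGetD p (PySem.Int.mod r (p.length : Int)) 0) : Nat) : Int))).sum
    = cnt p xs k := by
  induction xs generalizing k with
  | nil =>
    simp [cnt, PySem.List.enumerate_nil, List.sum_eq_zero]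
  | cons x xs ih =>
    rw [PySem.List.enumerate_cons, List.map_cons]
    simp only [List.count_cons, keyOf, beq_iff_eq, Nat.cast_add, apply_ite (Nat.cast : Nat → Int),
      Nat.cast_one, Nat.cast_zero]
    rw [PySem.List.sum_map_add_int, ih, cnt_cons,
      sum_ind (fun r => PySem.List.pyGetD p (PySem.Int.mod r (p.length : Int)) 0)
        (PySem.Int.mod k 40) x (PySem.Int.mod_nonneg k (by norm_num))
        (PySem.Int.mod_lt k (by norm_num)),
      mod_mod_40 p h5 hdvd]
    ring

-- the histogram score equals the direct match count
theorem patScoreH_eq (p : List Int) (h5 : 0 < p.length)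
    (hdvd : (p.length : Int) ∣ 40) (xs : List Int) :
    patScoreH (histOf xs) p = cnt p xs 0 := by
  rw [patScoreH, PySem.List.foldl_add]
  simp only [histOf_getD]
  rw [score_cnt p h5 hdvd xs 0, zero_add]

-- ===== VERDICT (by name: the statement is the Claim_ definition above) =====
theorem solutionTh_spec : Claim_equal_solutionTh := by
  intro answers _
  show solutionTh answers = solutionTh_alt answers
  unfold solutionTh solutionTh_alt
  rw [foldA_eq]
  simp only [List.map_cons, List.map_nil, zero_add,
    patScoreH_eq [1,2,3,4,5] (by simp) (by norm_num) answers,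
    patScoreH_eq [2,1,2,3,2,4,2,5] (by simp) (by norm_num) answers,
    patScoreH_eq [3,3,1,1,2,2,4,4,5,5] (by simp) (by norm_num) answers]
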